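-- pv_equiv track=rewrite | github.com/Wlodzimierz-Lewoniewski/zadanie-0-kinczol2001 | main.py | find_query_matches
-- ===== SOURCE A (Python) =====
-- import string
--
-- def count_word_occurrences(word, text):
--     cleaned_text = ''.join(char.lower() if char not in string.punctuation else ' ' for char in text)
--     word_list = cleaned_text.split()
--     return word_list.count(word)
--
-- def find_query_matches(docs, queries):
--     output = []
--     for query in queries:
--         cleaned_query = ''.join(char for char in query if char not in string.punctuation)
--         doc_match_counts = [(idx, count_word_occurrences(cleaned_query, doc)) for idx, doc in enumerate(docs)]
--         filtered_results = [entry for entry in doc_match_counts if entry[1] > 0]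
--         sorted_results = sorted(filtered_results, key=lambda item: (-item[1], item[0]))
--         matched_indexes = [doc_index for doc_index, _ in sorted_results]
--         output.append(matched_indexes)
--     return output
-- ===== SOURCE B (Python) =====
-- import string
--
-- def find_query_matches(docs, queries):
--     punct = set(string.punctuation)
--     counters = []
--     for doc in docs:
--         cleaned = ''.join(c.lower() if c not in punct else ' ' for c in doc)
--         counts = {}
--         for w in cleaned.split():
--             counts[w] = counts.get(w, 0) + 1
--         counters.append(counts)
--     output = []
--     for query in queries:
--         key = ''.join(c for c in query if c not in punct)
--         matches = [(i, counts[key]) for i, counts in enumerate(counters) if key in counts]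
--         matches.sort(key=lambda t: (-t[1], t[0]))
--         output.append([i for i, _ in matches])
--     return output
-- ===== Notes on version B (the rewrite author's own statement) =====
-- stated objective: faster
-- what changed: B cleans and tokenizes every document once up front into a per-doc word-count dictionary, so each query is answered by a dict lookup per document instead of re-cleaning and re-scanning every document per query.
import Mathlib
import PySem

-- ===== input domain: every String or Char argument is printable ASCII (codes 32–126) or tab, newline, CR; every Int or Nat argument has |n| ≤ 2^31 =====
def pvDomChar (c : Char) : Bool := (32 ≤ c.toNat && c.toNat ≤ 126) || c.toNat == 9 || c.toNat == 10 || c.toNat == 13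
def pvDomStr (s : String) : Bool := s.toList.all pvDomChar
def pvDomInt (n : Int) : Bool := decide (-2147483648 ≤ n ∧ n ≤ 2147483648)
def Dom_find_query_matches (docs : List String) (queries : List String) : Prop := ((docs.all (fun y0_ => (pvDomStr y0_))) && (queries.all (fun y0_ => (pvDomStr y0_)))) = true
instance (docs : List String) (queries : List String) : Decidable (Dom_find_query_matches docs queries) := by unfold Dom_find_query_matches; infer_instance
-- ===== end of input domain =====

-- B precomputes one word-count dictionary per document so each query is a lookup instead of a rescan; objective: faster.


-- string.punctuation
def pvPunct : List Char := "!\"#$%&'()*+,-./:;<=>?@[\\]^_`{|}~".toList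

-- ===== PORT A =====
def count_word_occurrences (word : List Char) (text : String) : Int :=
  let cleaned_text := text.toList.map (fun c => if c ∈ pvPunct then ' ' else PySem.Chars.lowerChar c)
  let word_list := PySem.Chars.split₀ cleaned_text
  (word_list.count word : Int)

def find_query_matches (docs : List String) (queries : List String) : List (List Int) :=
  queries.foldl (fun output query =>
    let cleaned_query := query.toList.filter (fun c => decide (c ∉ pvPunct))
    let doc_match_counts := (PySem.List.enumerate docs).map
      (fun p => (p.1, count_word_occurrences cleaned_query p.2))
    let filtered_results := doc_match_counts.filter (fun e => decide (e.2 > 0))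
    let sorted_results := PySem.List.sorted2 filtered_results (fun item => -item.2) (fun item => item.1) false
    let matched_indexes := sorted_results.map (fun t => t.1)
    output ++ [matched_indexes]) []

-- ===== PORT B =====
def pvMkCounts (doc : String) : PySem.Dict (List Char) Int :=
  let cleaned := doc.toList.map (fun c => if c ∈ pvPunct then ' ' else PySem.Chars.lowerChar c)
  (PySem.Chars.split₀ cleaned).foldl (fun d w => d.insert w (d.getD w 0 + 1)) PySem.Dict.empty

def find_query_matches_alt (docs : List String) (queries : List String) : List (List Int) :=
  let counters := docs.foldl (fun cs doc => cs ++ [pvMkCounts doc]) []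
  queries.foldl (fun output query =>
    let key := query.toList.filter (fun c => decide (c ∉ pvPunct))
    let matched := ((PySem.List.enumerate counters).filter (fun p => p.2.contains key)).map
      (fun p => (p.1, p.2.getD key 0))
    let sorted := PySem.List.sorted2 matched (fun t => -t.2) (fun t => t.1) false
    output ++ [sorted.map (fun t => t.1)]) []

-- ===== PRECONDITION & SPEC =====
def Spec_find_query_matches (docs : List String) (queries : List String) (out : List (List Int)) : Prop := out = find_query_matches_alt docs queries
instance (docs : List String) (queries : List String) (out : List (List Int)) : Decidable (Spec_find_query_matches docs queries out) := by unfold Spec_find_query_matches; infer_instance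

-- ===== CLAIM (what is proved, stated in full; the proofs are below) =====
def Claim_equal_find_query_matches : Prop := ∀ (docs : List String) (queries : List String), Dom_find_query_matches docs queries → Spec_find_query_matches docs queries (find_query_matches docs queries)

-- ===== LEMMAS AND PROOFS =====
theorem pv_enumerate_map {α β : Type} (f : α → β) (xs : List α) (s : Int) :
    PySem.List.enumerate (xs.map f) s = (PySem.List.enumerate xs s).map (fun p => (p.1, f p.2)) := by
  induction xs generalizing s with
  | nil => simp [PySem.List.enumerate_nil]
  | cons x t ih => simp [PySem.List.enumerate_cons, ih]

theorem pv_mkCounts_eq_counter (doc : String) :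
    pvMkCounts doc = PySem.Dict.counter
      (PySem.Chars.split₀ (doc.toList.map (fun c => if c ∈ pvPunct then ' ' else PySem.Chars.lowerChar c))) := by
  simp [pvMkCounts, PySem.Dict.foldl_insert_getD_add_one_eq_counter]

theorem pv_per_query (docs : List String) (query : String) :
    (PySem.List.sorted2
      (((PySem.List.enumerate docs).map
          (fun p => (p.1, count_word_occurrences (query.toList.filter (fun c => decide (c ∉ pvPunct))) p.2))).filter
        (fun e => decide (e.2 > 0)))
      (fun item => -item.2) (fun item => item.1) false).map (fun t => t.1)
    =
    (PySem.List.sorted2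
      (((PySem.List.enumerate (docs.map pvMkCounts)).filter
          (fun p => p.2.contains (query.toList.filter (fun c => decide (c ∉ pvPunct))))).map
        (fun p => (p.1, p.2.getD (query.toList.filter (fun c => decide (c ∉ pvPunct))) 0)))
      (fun t => -t.2) (fun t => t.1) false).map (fun t => t.1) := by
  set key := query.toList.filter (fun c => decide (c ∉ pvPunct)) with hkey
  rw [pv_enumerate_map, List.filter_map, List.filter_map, List.map_map]
  congr 1
  have hpred : ∀ p : Int × String,
      ((fun e : Int × Int => decide (e.2 > 0)) ∘ (fun p : Int × String => (p.1, count_word_occurrences key p.2))) p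
      = ((fun q : Int × PySem.Dict (List Char) Int => q.2.contains key) ∘ (fun p : Int × String => (p.1, pvMkCounts p.2))) p := by
    intro p
    simp [Function.comp, count_word_occurrences, pv_mkCounts_eq_counter, PySem.Dict.contains_counter,
      List.count_pos_iff]
  rw [List.filter_congr (fun p _ => hpred p)]
  have hmap : ∀ p : Int × String,
      (fun p : Int × String => (p.1, count_word_occurrences key p.2)) p
      = ((fun q : Int × PySem.Dict (List Char) Int => (q.1, q.2.getD key 0)) ∘ (fun p : Int × String => (p.1, pvMkCounts p.2))) p := by
    intro p
    simp [Function.comp, count_word_occurrences, pv_mkCounts_eq_counter, PySem.Dict.getD_counter]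
  rw [List.map_congr_left (fun p _ => hmap p)]

-- ===== VERDICT (by name: the statement is the Claim_ definition above) =====
theorem find_query_matches_spec : Claim_equal_find_query_matches := by
  intro docs queries _
  unfold Spec_find_query_matches find_query_matches find_query_matches_alt
  rw [PySem.List.foldl_append_singleton_eq_map (l := docs) (f := pvMkCounts) (acc := [])]
  simp only [List.nil_append]
  rw [PySem.List.foldl_append_singleton_eq_map, PySem.List.foldl_append_singleton_eq_map]
  simp only [List.nil_append]
  exact List.map_congr_left (fun q _ => pv_per_query docs q)
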